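-- pv_equiv track=rewrite | github.com/dohlee/daily-rosalind | scripts/bioinformatics-textbook-track/BA1F.py | skew_minimizing_positions
-- ===== SOURCE A (Python) =====
-- def skew_minimizing_positions(dna):
--     """Return the positions that minimize the G-C skew of dna[:pos]."""
--     minSkew, skew = 12345679, 0
--     pos = []
--     for i, base in enumerate(dna, 1):
--         if base == 'C':
--             skew -= 1
--         elif base == 'G':
--             skew += 1
--
--         if skew < minSkew:
--             minSkew = skew
--             pos = [i]
--         elif skew == minSkew:
--             pos.append(i)
--
--     return pos
-- ===== SOURCE B (Python) =====
-- def skew_minimizing_positions(dna):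
--     """Return the positions that minimize the G-C skew of dna[:pos]."""
--     skews = []
--     running = 0
--     for base in dna:
--         running += 1 if base == 'G' else (-1 if base == 'C' else 0)
--         skews.append(running)
--     if not skews:
--         return []
--     m = min(skews)
--     return [i + 1 for i, v in enumerate(skews) if v == m]
-- ===== Notes on version B (the rewrite author's own statement) =====
-- stated objective: alternative
-- what changed: B materializes the full prefix-skew table in one pass, then takes min() and collects matching 1-based positions in a separate comprehension, instead of A's single loop that tracks the running minimum with a sentinel and rebuilds/appends the position list on the fly.
import Mathlib
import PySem

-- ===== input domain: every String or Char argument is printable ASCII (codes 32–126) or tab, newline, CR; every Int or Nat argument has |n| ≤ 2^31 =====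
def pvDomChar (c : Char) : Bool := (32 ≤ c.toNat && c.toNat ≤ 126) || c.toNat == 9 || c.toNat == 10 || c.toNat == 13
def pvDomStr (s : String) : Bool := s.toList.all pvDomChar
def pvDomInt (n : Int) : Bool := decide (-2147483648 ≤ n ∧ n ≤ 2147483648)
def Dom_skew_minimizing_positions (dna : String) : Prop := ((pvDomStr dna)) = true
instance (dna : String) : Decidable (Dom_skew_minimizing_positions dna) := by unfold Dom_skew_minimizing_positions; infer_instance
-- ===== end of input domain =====

-- B builds the full prefix-skew table first, then takes its minimum and collects the
-- 1-based positions attaining it in a separate pass, instead of A's on-the-fly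
-- min-tracking loop with a sentinel; same cost, different decomposition (objective: alternative).

-- ===== PORT A =====
-- state: (minSkew, skew, pos)
def skewStepA (st : Int × Int × List Int) (p : Int × Char) : Int × Int × List Int :=
  let skew' : Int :=
    if p.2 = 'C' then st.2.1 - 1
    else if p.2 = 'G' then st.2.1 + 1
    else st.2.1
  if skew' < st.1 then (skew', skew', [p.1])
  else if skew' = st.1 then (st.1, skew', st.2.2 ++ [p.1])
  else (st.1, skew', st.2.2)

def skew_minimizing_positions (dna : String) : List Int :=
  ((PySem.List.enumerate dna.toList 1).foldl skewStepA (12345679, 0, [])).2.2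

-- ===== PORT B =====
-- one pass building (running, skews)
def skewStepB (st : Int × List Int) (base : Char) : Int × List Int :=
  let running : Int := st.1 + (if base = 'G' then 1 else if base = 'C' then -1 else 0)
  (running, st.2 ++ [running])

def skew_minimizing_positions_alt (dna : String) : List Int :=
  let skews := (dna.toList.foldl skewStepB (0, [])).2
  match PySem.List.min? skews (fun x => x) with
  | none => []
  | some m => ((PySem.List.enumerate skews 0).filter (fun p => p.2 == m)).map (fun p => p.1 + 1)

-- ===== PRECONDITION & SPEC =====
def Spec_skew_minimizing_positions (dna : String) (out : List Int) : Prop := out = skew_minimizing_positions_alt dna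
instance (dna : String) (out : List Int) : Decidable (Spec_skew_minimizing_positions dna out) := by unfold Spec_skew_minimizing_positions; infer_instance

-- ===== CLAIM (what is proved, stated in full; the proofs are below) =====
def Claim_equal_skew_minimizing_positions : Prop := ∀ (dna : String), Dom_skew_minimizing_positions dna → Spec_skew_minimizing_positions dna (skew_minimizing_positions dna)

-- ===== LEMMAS AND PROOFS =====

-- per-base skew increment, in B's branch order
def delta (c : Char) : Int := if c = 'G' then 1 else if c = 'C' then -1 else 0

-- prefix-skew values starting from running value s
def skewList (s : Int) : List Char → List Int
  | [] => []
  | c :: t => (s + delta c) :: skewList (s + delta c) t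

-- total skew change of a list
def sd : List Char → Int
  | [] => 0
  | c :: t => delta c + sd t

-- 1-based-from-i positions of value v in a list
def idxs (v : Int) (i : Int) : List Int → List Int
  | [] => []
  | x :: t => (if x = v then [i] else []) ++ idxs v (i + 1) t

lemma delta_le_one (c : Char) : delta c ≤ 1 := by
  unfold delta; split_ifs <;> omega

lemma foldl_min_le (l : List Int) : ∀ a : Int, l.foldl min a ≤ a := by
  induction l with
  | nil => intro a; simp
  | cons x t ih => intro a; exact le_trans (ih (min a x)) (min_le_left a x)

lemma skewStepA_skew' (s : Int) (c : Char) :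
    (if c = 'C' then s - 1 else if c = 'G' then s + 1 else s) = s + delta c := by
  unfold delta
  by_cases hc : c = 'C' <;> by_cases hg : c = 'G' <;> simp [hc, hg] <;> omega

-- main invariant of A's loop
lemma loopA (l : List Char) : ∀ (i m s : Int) (pos : List Int),
    (PySem.List.enumerate l i).foldl skewStepA (m, s, pos)
      = ((skewList s l).foldl min m, s + sd l,
          if (skewList s l).foldl min m < m
          then idxs ((skewList s l).foldl min m) i (skewList s l)
          else pos ++ idxs m i (skewList s l)) := by
  induction l with
  | nil =>
    intro i m s pos
    simp [PySem.List.enumerate_nil, skewList, sd, idxs]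
  | cons c t ih =>
    intro i m s pos
    rw [PySem.List.enumerate_cons, List.foldl_cons]
    have hstep : skewStepA (m, s, pos) (i, c)
        = (if s + delta c < m then ((s + delta c), (s + delta c), [i])
           else if s + delta c = m then (m, (s + delta c), pos ++ [i])
           else (m, (s + delta c), pos)) := by
      simp only [skewStepA, skewStepA_skew' s c]
    rw [hstep]
    simp only [skewList, sd, List.foldl_cons, idxs]
    have hfle := foldl_min_le (skewList (s + delta c) t) (s + delta c)
    by_cases h1 : s + delta c < m
    · rw [if_pos h1]
      have hm : min m (s + delta c) = s + delta c := by omega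
      rw [ih (i + 1) (s + delta c) (s + delta c) [i], hm]
      simp only [Prod.mk.injEq]
      refine ⟨trivial, by omega, ?_⟩
      rw [if_pos (by omega : (skewList (s + delta c) t).foldl min (s + delta c) < m)]
      by_cases h2 : (skewList (s + delta c) t).foldl min (s + delta c) < s + delta c
      · rw [if_pos h2, if_neg (by omega : ¬ (s + delta c = (skewList (s + delta c) t).foldl min (s + delta c)))]
        simp
      · have hw : (skewList (s + delta c) t).foldl min (s + delta c) = s + delta c := by omega
        rw [if_neg h2, hw, if_pos rfl]
    · rw [if_neg h1]
      have hm : min m (s + delta c) = m := by omega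
      by_cases h2 : s + delta c = m
      · rw [if_pos h2, ih (i + 1) m (s + delta c) (pos ++ [i]), hm]
        simp only [Prod.mk.injEq]
        refine ⟨trivial, by omega, ?_⟩
        by_cases h3 : (skewList (s + delta c) t).foldl min m < m
        · rw [if_pos h3, if_pos h3, if_neg (by omega)]
          simp
        · rw [if_neg h3, if_neg h3, if_pos h2]
          simp
      · rw [if_neg h2, ih (i + 1) m (s + delta c) pos, hm]
        simp only [Prod.mk.injEq]
        refine ⟨trivial, by omega, ?_⟩
        by_cases h3 : (skewList (s + delta c) t).foldl min m < m
        · rw [if_pos h3, if_pos h3, if_neg (by omega)]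
          simp
        · rw [if_neg h3, if_neg h3, if_neg h2]
          simp

-- B's accumulating fold builds the skew table
lemma loopB (l : List Char) : ∀ (s : Int) (acc : List Int),
    l.foldl skewStepB (s, acc) = (s + sd l, acc ++ skewList s l) := by
  induction l with
  | nil => intro s acc; simp [sd, skewList]
  | cons c t ih =>
    intro s acc
    have hstep : skewStepB (s, acc) c = (s + delta c, acc ++ [s + delta c]) := rfl
    rw [List.foldl_cons, hstep, ih]
    simp only [skewList, sd, Prod.mk.injEq]
    exact ⟨by omega, by simp⟩

-- B's filter/map comprehension computes idxs
lemma filterMap_idxs (vs : List Int) : ∀ (k v : Int),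
    ((PySem.List.enumerate vs k).filter (fun p => p.2 == v)).map (fun p => p.1 + 1)
      = idxs v (k + 1) vs := by
  induction vs with
  | nil => intro k v; simp [PySem.List.enumerate_nil, idxs]
  | cons x t ih =>
    intro k v
    rw [PySem.List.enumerate_cons]
    by_cases h : x = v
    · simp [h, ih, idxs]
    · simp [h, ih, idxs]

-- ===== VERDICT (by name: the statement is the Claim_ definition above) =====
theorem skew_minimizing_positions_spec : Claim_equal_skew_minimizing_positions := by
  unfold Claim_equal_skew_minimizing_positions
  intro dna _
  unfold Spec_skew_minimizing_positions
  unfold skew_minimizing_positions skew_minimizing_positions_alt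
  rw [loopB dna.toList 0 []]
  simp only [List.nil_append]
  rw [loopA dna.toList 1 12345679 0 []]
  cases hsl : skewList 0 dna.toList with
  | nil => simp [PySem.List.min?, idxs]
  | cons x ts =>
    rw [PySem.List.min?_id_cons]
    -- x is the first skew value, |x| ≤ 1
    have hx : x ≤ 1 := by
      cases hd : dna.toList with
      | nil => rw [hd] at hsl; simp [skewList] at hsl
      | cons c t =>
        rw [hd] at hsl
        simp only [skewList, List.cons.injEq] at hsl
        have := delta_le_one c
        omega
    have hfle := foldl_min_le ts x
    have hm12 : min (12345679 : Int) x = x := by omega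
    have hfold : (x :: ts).foldl min (12345679 : Int) = ts.foldl min x := by
      simp [List.foldl_cons, hm12]
    rw [hfold]
    rw [if_pos (by omega : ts.foldl min x < 12345679)]
    show idxs (List.foldl min x ts) 1 (x :: ts)
        = ((PySem.List.enumerate (x :: ts) 0).filter (fun p => p.2 == List.foldl min x ts)).map (fun p => p.1 + 1)
    rw [filterMap_idxs]
    norm_num
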